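-- pv_equiv track=rewrite | github.com/DiptoChakrabarty/Voice-Encryption | HashingAndSalting.py | salt
-- ===== SOURCE A (Python) =====
-- def salt(text):
--     temp = ""
--     j = 0
--     salt = "ezioishan"
--     for i in range(len(text)):
--         if(i%2):
--             temp += text[i]
--         else:
--             temp += salt[j%len(salt)]
--             j += 1
--     return temp
-- ===== SOURCE B (Python) =====
-- SALT = "ezioishan"
--
--
-- def salt(text):
--     num_pairs = (len(text) + 1) // 2
--     pieces = [SALT[k % len(SALT)] + text[2 * k + 1:2 * k + 2]
--               for k in range(num_pairs)]
--     return "".join(pieces)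
-- ===== Notes on version B (the rewrite author's own statement) =====
-- stated objective: alternative
-- what changed: Replaces the stateful parity-branching character loop (counter j, if i%2) with a closed-form pair decomposition: one piece per output pair, salt char indexed directly by k % 9 plus the slice text[2k+1:2k+2], joined at the end.
import Mathlib
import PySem

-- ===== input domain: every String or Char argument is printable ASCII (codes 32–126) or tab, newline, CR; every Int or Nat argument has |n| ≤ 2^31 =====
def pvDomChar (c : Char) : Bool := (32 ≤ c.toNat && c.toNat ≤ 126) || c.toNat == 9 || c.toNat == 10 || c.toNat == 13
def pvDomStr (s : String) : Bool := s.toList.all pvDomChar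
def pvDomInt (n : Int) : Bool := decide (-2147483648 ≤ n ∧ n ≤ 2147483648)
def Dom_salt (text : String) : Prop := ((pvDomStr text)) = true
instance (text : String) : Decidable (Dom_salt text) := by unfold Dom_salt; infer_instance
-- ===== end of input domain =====

-- B replaces A's stateful parity loop with a closed-form per-pair decomposition (alternative, same cost).

-- ===== PORT A =====
def salt (text : String) : String :=
  -- temp = ""; j = 0; salt = "ezioishan"; for i in range(len(text)): …; return temp
  (((PySem.List.pyRange 0 (PySem.Str.len text) 1).foldl
    (fun (st : String × Int) i =>
      if PySem.Int.mod i 2 ≠ 0 then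
        -- temp += text[i]   (i is always in range, so the getD default is unreachable)
        (st.1.push ((PySem.Str.pyGet? text i).getD ' '), st.2)
      else
        -- temp += salt[j % len(salt)]; j += 1   (index is in range, getD unreachable)
        (st.1.push ((PySem.Str.pyGet? "ezioishan"
            (PySem.Int.mod st.2 (PySem.Str.len "ezioishan"))).getD ' '), st.2 + 1))
    ("", 0)).1)

-- ===== PORT B =====
def SALT_B : String := "ezioishan"

def salt_alt (text : String) : String :=
  -- num_pairs = (len(text) + 1) // 2
  let numPairs := PySem.Int.floordiv (PySem.Str.len text + 1) 2
  -- pieces = [SALT[k % len(SALT)] + text[2*k+1 : 2*k+2] for k in range(num_pairs)]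
  -- (Python's one-char string + slice concatenation is ported exactly as a cons on the char list)
  let pieces := (PySem.List.pyRange 0 numPairs 1).map
    (fun k => String.ofList
      (((PySem.Str.pyGet? SALT_B (PySem.Int.mod k (PySem.Str.len SALT_B))).getD ' ') ::
        (PySem.Str.slice text (some (2 * k + 1)) (some (2 * k + 2))).toList))
  -- return "".join(pieces)
  PySem.Str.join "" pieces

-- ===== PRECONDITION & SPEC =====
def Spec_salt (text : String) (out : String) : Prop := out = salt_alt text
instance (text : String) (out : String) : Decidable (Spec_salt text out) := by unfold Spec_salt; infer_instance

-- ===== CLAIM (what is proved, stated in full; the proofs are below) =====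
def Claim_equal_salt : Prop := ∀ (text : String), Dom_salt text → Spec_salt text (salt text)

-- ===== LEMMAS AND PROOFS =====

/-- The salt character used for the k-th even output position. -/
def saltCh (j : Int) : Char :=
  (PySem.Str.pyGet? "ezioishan" (PySem.Int.mod j (PySem.Str.len "ezioishan"))).getD ' '

/-- Reference recursion: what A's loop produces on the remaining characters,
    starting at index `i` with salt counter `j`. -/
def specA : Int → Int → List Char → List Char
  | _, _, [] => []
  | i, j, c :: t =>
    if PySem.Int.mod i 2 ≠ 0 then c :: specA (i + 1) j t
    else saltCh j :: specA (i + 1) (j + 1) t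

theorem mod_two_add_two (i : Int) : PySem.Int.mod (i + 2) 2 = PySem.Int.mod i 2 := by
  simp [PySem.Int.mod]

theorem specA_cons (i j : Int) (c : Char) (t : List Char) :
    specA i j (c :: t) = if PySem.Int.mod i 2 ≠ 0 then c :: specA (i + 1) j t
      else saltCh j :: specA (i + 1) (j + 1) t := rfl

theorem specA_even (i j : Int) (c : Char) (t : List Char) (h : PySem.Int.mod i 2 = 0) :
    specA i j (c :: t) = saltCh j :: specA (i + 1) (j + 1) t := by
  rw [specA_cons, if_neg (not_ne_iff.mpr h)]

theorem specA_odd (i j : Int) (c : Char) (t : List Char) (h : PySem.Int.mod i 2 ≠ 0) :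
    specA i j (c :: t) = c :: specA (i + 1) j t := by
  rw [specA_cons, if_pos h]

theorem specA_add_two (cs : List Char) : ∀ (i j : Int), specA (i + 2) j cs = specA i j cs := by
  induction cs with
  | nil => intro i j; rfl
  | cons c t ih =>
    intro i j
    have h : i + 2 + 1 = i + 1 + 2 := by ring
    by_cases hm : PySem.Int.mod i 2 = 0
    · rw [specA_even _ _ _ _ (by rw [mod_two_add_two]; exact hm), specA_even _ _ _ _ hm, h, ih]
    · rw [specA_odd _ _ _ _ (by rw [mod_two_add_two]; exact hm), specA_odd _ _ _ _ hm, h, ih]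

theorem A_loop (text : String) (rest : List Char) : ∀ (i : Nat) (j : Int) (acc : String),
    text.toList.drop i = rest →
    ((PySem.List.pyRange (i : Int) ((i : Int) + rest.length) 1).foldl
      (fun (st : String × Int) i =>
        if PySem.Int.mod i 2 ≠ 0 then
          (st.1.push ((PySem.Str.pyGet? text i).getD ' '), st.2)
        else
          (st.1.push ((PySem.Str.pyGet? "ezioishan"
              (PySem.Int.mod st.2 (PySem.Str.len "ezioishan"))).getD ' '), st.2 + 1))
      (acc, j)).1.toList = acc.toList ++ specA i j rest := by
  induction rest with
  | nil =>
    intro i j acc _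
    rw [PySem.List.pyRange_one_eq_nil (by simp)]
    simp [specA]
  | cons c t ih =>
    intro i j acc hdrop
    have hget : text.toList[i]? = some c := by
      rw [← List.head?_drop, hdrop]; rfl
    have hdrop' : text.toList.drop (i + 1) = t := by
      rw [← List.tail_drop, hdrop]; rfl
    rw [show ((i : Int) + ((c :: t).length : Int)) = (((i + 1 : Nat) : Int) + (t.length : Int))
      by push_cast [List.length_cons]; ring]
    rw [PySem.List.pyRange_one_cons (by push_cast; omega)]
    simp only [List.foldl_cons]
    by_cases hm : PySem.Int.mod (i : Int) 2 ≠ 0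
    · rw [if_pos hm]
      simp only [PySem.Str.pyGet?_natCast, hget, Option.getD_some]
      have h2 := ih (i + 1) j (acc.push c) hdrop'
      push_cast at h2 ⊢
      rw [h2, String.toList_push, specA_odd _ _ _ _ hm]
      simp
    · rw [if_neg hm]
      have h2 := ih (i + 1) (j + 1)
        (acc.push ((PySem.Str.pyGet? "ezioishan"
          (PySem.Int.mod j (PySem.Str.len "ezioishan"))).getD ' ')) hdrop'
      push_cast at h2 ⊢
      rw [h2, String.toList_push,
        specA_even _ _ _ _ (by simpa using hm)]
      simp [saltCh]

theorem salt_toList (text : String) :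
    (salt text).toList = specA 0 0 text.toList := by
  have h := A_loop text text.toList 0 0 "" (by simp)
  simp only [Nat.cast_zero, zero_add] at h
  rw [show ("" : String).toList = ([] : List Char) from rfl, List.nil_append] at h
  unfold salt
  rw [PySem.Str.len_eq]
  exact h

theorem join_empty_sep (xss : List (List Char)) :
    PySem.Chars.join [] xss = xss.flatten := by
  induction xss with
  | nil => rfl
  | cons h t ih =>
    cases t with
    | nil => simp [PySem.Chars.join, List.intercalate]
    | cons h2 t2 =>
      have hstep : PySem.Chars.join [] (h :: h2 :: t2) = h ++ PySem.Chars.join [] (h2 :: t2) := by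
        simp [PySem.Chars.join, List.intercalate, List.intersperse]
      rw [hstep, ih]
      simp

/-- Closed form of B's pieces, flattened, with the salt stream shifted by `j`. -/
def specB (j : Int) (cs : List Char) : List Char :=
  (List.range ((cs.length + 1) / 2)).flatMap
    (fun (k : Nat) => saltCh (j + (k : Int)) :: ((cs.drop (2 * k + 1)).take 1))

theorem specA_eq_specB : ∀ (cs : List Char) (j : Int), specA 0 j cs = specB j cs
  | [], _ => by simp [specA, specB]
  | [a], j => by
    rw [specA_even _ _ _ _ (by decide)]
    show [saltCh j] = specB j [a]
    norm_num [specB, List.range_one]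
  | a :: b :: t, j => by
    have ih := specA_eq_specB t (j + 1)
    have h2 : specA (0 + 1 + 1) (j + 1) t = specA 0 (j + 1) t := by
      have := specA_add_two t 0 (j + 1)
      norm_num at this ⊢
      exact this
    rw [specA_even _ _ _ _ (by decide), specA_odd _ _ _ _ (by decide), h2, ih]
    simp only [specB]
    have hlen : ((a :: b :: t).length + 1) / 2 = (t.length + 1) / 2 + 1 := by
      simp; omega
    rw [hlen, List.range_succ_eq_map, List.flatMap_cons, List.flatMap_map]
    norm_num
    apply List.flatMap_congr
    intro k _
    have hd : (b :: t).drop (2 * (k + 1)) = t.drop (2 * k + 1) := by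
      rw [show 2 * (k + 1) = (2 * k + 1) + 1 by ring]
      rfl
    have hc : j + 1 + (k : Int) = j + ((k : Int) + 1) := by ring
    rw [hc, hd]

theorem salt_alt_toList (text : String) :
    (salt_alt text).toList = specB 0 text.toList := by
  have hnp : PySem.Int.floordiv (PySem.Str.len text + 1) 2
      = (((text.toList.length + 1) / 2 : Nat) : Int) := by
    rw [PySem.Str.len_eq]
    simp [PySem.Int.floordiv, Int.fdiv_eq_ediv]
  simp only [salt_alt, PySem.Str.toList_join, hnp, PySem.List.pyRange_one]
  rw [show ("" : String).toList = ([] : List Char) from rfl, join_empty_sep]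
  simp only [List.map_map, List.flatten_eq_flatMap, List.flatMap_map, specB,
    sub_zero, Int.toNat_natCast]
  apply List.flatMap_congr
  intro k hk
  simp only [Function.comp, String.toList_ofList, zero_add]
  refine congrArg₂ List.cons ?_ ?_
  · simp [saltCh, SALT_B]
  · try rw [PySem.Str.toList_slice]
    show PySem.List.slice _ _ _ = _
    rw [show ((2 : Int) * (k : Int) + 1) = ((2 * k + 1 : Nat) : Int) by push_cast; ring]
    rw [show ((2 : Int) * (k : Int) + 2) = ((2 * k + 2 : Nat) : Int) by push_cast; ring]
    rw [PySem.List.slice_natCast]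
    congr 1
    omega

-- ===== VERDICT (by name: the statement is the Claim_ definition above) =====
theorem salt_spec : Claim_equal_salt := by
  intro text _
  unfold Spec_salt
  rw [← String.toList_inj, salt_toList, salt_alt_toList, specA_eq_specB]
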